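-- pv_equiv track=rewrite | github.com/zhongliwu/leetcode | arrays/RemoveElement.py | q844_helper_emit_backwards
-- ===== SOURCE A (Python) =====
-- def q844_helper_emit_backwards(chars: list[str]) -> int:
--     slow, fast = len(chars) - 1, len(chars) - 1
--     count_backwards = 0
--     while fast >= 0:
--         if chars[fast] == '#':
--             count_backwards += 1
--             fast -= 1
--         elif count_backwards > 0:
--             fast -= 1
--             count_backwards -= 1
--         else:
--             chars[slow] = chars[fast]
--             slow -= 1
--             fast -= 1
--
--     return len(chars) - slow - 1
-- ===== SOURCE B (Python) =====
-- def q844_helper_emit_backwards(chars: list[str]) -> int: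
--     stack = []
--     for c in chars:
--         if c == '#':
--             if stack:
--                 stack.pop()
--         else:
--             stack.append(c)
--     k = len(stack)
--     chars[len(chars) - k:] = stack
--     return k
-- ===== Notes on version B (the rewrite author's own statement) =====
-- stated objective: idiomatic
-- what changed: Replaces the backward two-pointer scan with pending-backspace counter by a forward single pass using an explicit stack; survivors are written into the tail in one slice assignment instead of per-element writes, and the stack size is returned.
import Mathlib
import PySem

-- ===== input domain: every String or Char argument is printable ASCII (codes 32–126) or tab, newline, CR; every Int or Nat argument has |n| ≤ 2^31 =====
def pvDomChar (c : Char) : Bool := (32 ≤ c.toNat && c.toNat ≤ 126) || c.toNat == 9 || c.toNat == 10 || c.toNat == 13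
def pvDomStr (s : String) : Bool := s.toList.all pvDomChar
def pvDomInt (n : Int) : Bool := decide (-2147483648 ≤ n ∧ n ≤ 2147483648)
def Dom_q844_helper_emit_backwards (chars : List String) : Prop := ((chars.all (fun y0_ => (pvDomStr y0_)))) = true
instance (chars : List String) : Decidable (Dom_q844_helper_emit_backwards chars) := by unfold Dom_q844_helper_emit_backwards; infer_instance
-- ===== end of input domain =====

-- B replaces A's backward two-pointer scan (pending-backspace counter) by a forward
-- single pass with an explicit stack; same return value, same in-place tail mutation
-- (the mutation is replicated in Source B; the Lean claim is about the return value only).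


-- ===== PORT A =====
-- the while loop: `n` is fast+1 (number of positions still to visit); the slow
-- pointer is only read back at the end (`chars[slow] = chars[fast]` is mutation
-- of the argument, invisible to the returned value), so the loop returns slow.
def q844_loopA (chars : List String) : Nat → Int → Int → Int
  | 0, slow, _ => slow
  | n + 1, slow, cnt =>
    if (chars.getD n "") = "#" then
      q844_loopA chars n slow (cnt + 1)
    else if cnt > 0 then
      q844_loopA chars n slow (cnt - 1)
    else
      q844_loopA chars n (slow - 1) cnt

def q844_helper_emit_backwards (chars : List String) : Int :=
  (chars.length : Int) - q844_loopA chars chars.length ((chars.length : Int) - 1) 0 - 1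

-- ===== PORT B =====
-- forward pass; the stack's top is the list head (Python appends/pops at the end)
def q844_stack (chars : List String) : List String :=
  chars.foldl (fun st c => if c = "#" then (if st.isEmpty then st else st.tail) else c :: st) []

def q844_helper_emit_backwards_alt (chars : List String) : Int :=
  ((q844_stack chars).length : Int)

-- ===== PRECONDITION & SPEC =====
def Spec_q844_helper_emit_backwards (chars : List String) (out : Int) : Prop := out = q844_helper_emit_backwards_alt chars
instance (chars : List String) (out : Int) : Decidable (Spec_q844_helper_emit_backwards chars out) := by unfold Spec_q844_helper_emit_backwards; infer_instance

-- ===== CLAIM (what is proved, stated in full; the proofs are below) =====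
def Claim_equal_q844_helper_emit_backwards : Prop := ∀ (chars : List String), Dom_q844_helper_emit_backwards chars → Spec_q844_helper_emit_backwards chars (q844_helper_emit_backwards chars)

-- ===== LEMMAS AND PROOFS =====

-- the stack after one more character, phrased on prefixes
lemma q844_stack_take_succ (chars : List String) (n : Nat) (h : n < chars.length) :
    q844_stack (chars.take (n + 1)) =
      if chars.getD n "" = "#" then
        (if (q844_stack (chars.take n)).isEmpty then q844_stack (chars.take n)
         else (q844_stack (chars.take n)).tail)
      else chars.getD n "" :: q844_stack (chars.take n) := by
  have ht : chars.take (n + 1) = chars.take n ++ [chars.getD n ""] := by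
    rw [List.take_add_one]
    simp [List.getD, List.getElem?_eq_getElem h]
  simp [q844_stack, ht, List.foldl_append]

-- loop invariant: the backward loop over the first n characters, with cnt pending
-- backspaces, decrements slow by max(|stack of the prefix| - cnt, 0)
lemma q844_loopA_eq (chars : List String) :
    ∀ (n : Nat) (slow cnt : Int), 0 ≤ cnt → n ≤ chars.length →
      q844_loopA chars n slow cnt =
        slow - max (((q844_stack (chars.take n)).length : Int) - cnt) 0 := by
  intro n
  induction n with
  | zero => intro slow cnt h0 _; simp [q844_loopA, q844_stack]; omega
  | succ n ih =>
    intro slow cnt h0 hn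
    have hlt : n < chars.length := by omega
    have hs := q844_stack_take_succ chars n hlt
    by_cases hc : chars.getD n "" = "#"
    · rw [q844_loopA, if_pos hc, ih _ _ (by omega) (by omega), hs, if_pos hc]
      rcases q844_stack (chars.take n) with _ | ⟨a, tl⟩ <;> simp <;> omega
    · by_cases hcnt : cnt > 0
      · rw [q844_loopA, if_neg hc, if_pos hcnt, ih _ _ (by omega) (by omega), hs, if_neg hc]
        simp
        omega
      · rw [q844_loopA, if_neg hc, if_neg hcnt, ih _ _ (by omega) (by omega), hs, if_neg hc]
        simp
        omega

-- ===== VERDICT (by name: the statement is the Claim_ definition above) =====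
theorem q844_helper_emit_backwards_spec : Claim_equal_q844_helper_emit_backwards := by
  intro chars _
  unfold Spec_q844_helper_emit_backwards q844_helper_emit_backwards q844_helper_emit_backwards_alt
  rw [q844_loopA_eq chars chars.length _ 0 le_rfl le_rfl]
  simp
  omega
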